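-- pv_equiv track=rewrite | github.com/crocs-muni/coinjoin-mappings | cj_mapping_enumerator/utils.py | compare_num_mappings
-- ===== SOURCE A (Python) =====
-- def compare_num_mappings(m1, m2):
--     if len(m1) != len(m2):
--         return False
--
--     v = [False]*len(m2)
--
--     for sm1 in m1:
--         for i,sm2 in enumerate(m2):
--             if v[i]:
--                 continue
--             if len(sm1[0]) != len(sm2[0]) or len(sm1[1]) != len(sm2[1]):
--                    continue
--
--             if sorted(sm1[0]) == sorted(sm2[0]) and sorted(sm1[1]) == sorted(sm2[1]):
--                 v[i] = True
--                 break
--         else: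
--             return False
--     return True
-- ===== SOURCE B (Python) =====
-- def compare_num_mappings(m1, m2):
--     if len(m1) != len(m2):
--         return False
--     key = lambda sm: [sorted(sm[0]), sorted(sm[1])]
--     return sorted(map(key, m1)) == sorted(map(key, m2))
-- ===== Notes on version B (the rewrite author's own statement) =====
-- stated objective: simpler
-- what changed: Replaces the greedy nested-loop matching with a visited array by canonicalising each submapping to a sorted key and comparing the two sorted key lists.
import Mathlib
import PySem

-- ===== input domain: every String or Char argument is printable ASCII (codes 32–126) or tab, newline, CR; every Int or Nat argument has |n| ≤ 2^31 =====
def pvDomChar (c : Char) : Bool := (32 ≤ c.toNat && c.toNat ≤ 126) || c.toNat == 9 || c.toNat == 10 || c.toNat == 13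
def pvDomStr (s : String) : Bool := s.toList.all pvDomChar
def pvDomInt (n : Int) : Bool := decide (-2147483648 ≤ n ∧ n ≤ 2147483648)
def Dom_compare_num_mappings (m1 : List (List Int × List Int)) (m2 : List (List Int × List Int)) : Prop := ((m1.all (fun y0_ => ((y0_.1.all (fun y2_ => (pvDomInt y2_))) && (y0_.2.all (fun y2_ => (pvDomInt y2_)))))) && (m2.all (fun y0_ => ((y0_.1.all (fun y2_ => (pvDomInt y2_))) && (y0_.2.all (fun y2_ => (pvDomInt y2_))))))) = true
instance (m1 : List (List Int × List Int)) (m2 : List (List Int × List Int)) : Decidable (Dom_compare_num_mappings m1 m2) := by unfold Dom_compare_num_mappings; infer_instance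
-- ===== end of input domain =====

-- B replaces A's greedy matching (visited array, nested scans) by sorting canonical
-- keys once and comparing the two sorted key lists (simpler: one guard plus one comparison).

-- ===== PORT A =====
-- inner 'for i, sm2 in enumerate(m2)' loop: walks m2 and the visited list v in lockstep;
-- returns the updated visited list on a match (v[i] = True; break), none when the loop falls through.
def cnmInner (sm1 : List Int × List Int) : List (List Int × List Int) → List Bool → Option (List Bool)
  | sm2 :: ms, b :: bs =>
    if b then (cnmInner sm1 ms bs).map (b :: ·)
    else if sm1.1.length ≠ sm2.1.length ∨ sm1.2.length ≠ sm2.2.length then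
      (cnmInner sm1 ms bs).map (b :: ·)
    else if PySem.List.sorted sm1.1 (fun x => x) false = PySem.List.sorted sm2.1 (fun x => x) false ∧
            PySem.List.sorted sm1.2 (fun x => x) false = PySem.List.sorted sm2.2 (fun x => x) false then
      some (true :: bs)
    else (cnmInner sm1 ms bs).map (b :: ·)
  | _, _ => none

-- outer 'for sm1 in m1' loop with the for/else: an exhausted inner loop returns False.
def cnmOuter : List (List Int × List Int) → List (List Int × List Int) → List Bool → Bool
  | [], _, _ => true
  | sm1 :: rest, m2, v =>
    match cnmInner sm1 m2 v with
    | none => false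
    | some v' => cnmOuter rest m2 v'

def compare_num_mappings (m1 : List (List Int × List Int)) (m2 : List (List Int × List Int)) : Bool :=
  if m1.length ≠ m2.length then false
  else cnmOuter m1 m2 (List.replicate m2.length false)

-- ===== PORT B =====
-- key = lambda sm: [sorted(sm[0]), sorted(sm[1])]
def cnmKey (sm : List Int × List Int) : List (List Int) :=
  [PySem.List.sorted sm.1 (fun x => x) false, PySem.List.sorted sm.2 (fun x => x) false]

def compare_num_mappings_alt (m1 : List (List Int × List Int)) (m2 : List (List Int × List Int)) : Bool :=
  if m1.length ≠ m2.length then false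
  -- the sort compares the canonical keys (lists of Int lists) lexicographically, exactly
  -- Python's list comparison; the LinearOrder instance is named explicitly (same order as
  -- the default List LT) so the library sorted/perm lemmas apply directly
  else decide (@PySem.List.sorted _ _ List.instLinearOrder.toLT LinearOrder.toDecidableLT (m1.map cnmKey) (fun x => x) false
             = @PySem.List.sorted _ _ List.instLinearOrder.toLT LinearOrder.toDecidableLT (m2.map cnmKey) (fun x => x) false)

-- ===== PRECONDITION & SPEC =====
def Spec_compare_num_mappings (m1 : List (List Int × List Int)) (m2 : List (List Int × List Int)) (out : Bool) : Prop := out = compare_num_mappings_alt m1 m2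
instance (m1 : List (List Int × List Int)) (m2 : List (List Int × List Int)) (out : Bool) : Decidable (Spec_compare_num_mappings m1 m2 out) := by unfold Spec_compare_num_mappings; infer_instance

-- ===== CLAIM (what is proved, stated in full; the proofs are below) =====
def Claim_equal_compare_num_mappings : Prop := ∀ (m1 : List (List Int × List Int)) (m2 : List (List Int × List Int)), Dom_compare_num_mappings m1 m2 → Spec_compare_num_mappings m1 m2 (compare_num_mappings m1 m2)

-- ===== LEMMAS AND PROOFS =====
-- the unvisited elements of m2
def cnmAvail : List (List Int × List Int) → List Bool → List (List Int × List Int)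
  | x :: xs, b :: bs => if b then cnmAvail xs bs else x :: cnmAvail xs bs
  | _, _ => []

theorem cnmAvail_replicate (m2 : List (List Int × List Int)) :
    cnmAvail m2 (List.replicate m2.length false) = m2 := by
  induction m2 with
  | nil => rfl
  | cons x xs ih => simp [cnmAvail, List.replicate, ih]

-- key equality forces componentwise length equality
theorem cnmKey_len {sm1 sm2 : List Int × List Int} (h : cnmKey sm2 = cnmKey sm1) :
    sm1.1.length = sm2.1.length ∧ sm1.2.length = sm2.2.length := by
  simp [cnmKey] at h
  obtain ⟨h1, h2⟩ := h
  constructor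
  · have := congrArg List.length h1
    simpa [PySem.List.length_sorted] using this.symm
  · have := congrArg List.length h2
    simpa [PySem.List.length_sorted] using this.symm

-- characterisation of one inner-loop pass: falls through iff no unvisited key matches
theorem cnmInner_none (sm1 : List Int × List Int) :
    ∀ (m2 : List (List Int × List Int)) (v : List Bool),
    cnmInner sm1 m2 v = none ↔ cnmKey sm1 ∉ (cnmAvail m2 v).map cnmKey := by
  intro m2
  induction m2 with
  | nil => intro v; simp [cnmInner, cnmAvail]
  | cons x xs ih =>
    intro v
    cases v with
    | nil => simp [cnmInner, cnmAvail]
    | cons b bs =>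
      cases b with
      | true => simpa [cnmInner, cnmAvail] using ih bs
      | false =>
        by_cases hm : sm1.1.length ≠ x.1.length ∨ sm1.2.length ≠ x.2.length
        · have hk : cnmKey sm1 ≠ cnmKey x := by
            intro h
            rcases cnmKey_len h.symm with ⟨e1, e2⟩
            rcases hm with h' | h' <;> [exact h' e1; exact h' e2]
          simp [cnmInner, cnmAvail, hm, hk, ih bs]
        · by_cases hs : PySem.List.sorted sm1.1 (fun x => x) false = PySem.List.sorted x.1 (fun x => x) false ∧
              PySem.List.sorted sm1.2 (fun x => x) false = PySem.List.sorted x.2 (fun x => x) false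
          · have hk : cnmKey sm1 = cnmKey x := by
              simp [cnmKey]; exact ⟨hs.1, hs.2⟩
            simp [cnmInner, cnmAvail, hm, hs, hk]
          · have hk : cnmKey sm1 ≠ cnmKey x := by
              intro h
              simp [cnmKey] at h
              exact hs ⟨h.1, h.2⟩
            simp [cnmInner, cnmAvail, hm, hs, hk, ih bs]

-- a successful inner pass marks exactly the first unvisited key-match as visited
theorem cnmInner_some (sm1 : List Int × List Int) :
    ∀ (m2 : List (List Int × List Int)) (v v' : List Bool),
    cnmInner sm1 m2 v = some v' →
    cnmAvail m2 v' = (cnmAvail m2 v).eraseP (fun x => decide (cnmKey x = cnmKey sm1)) := by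
  intro m2
  induction m2 with
  | nil => intro v v' h; simp [cnmInner] at h
  | cons x xs ih =>
    intro v v' h
    cases v with
    | nil => simp [cnmInner] at h
    | cons b bs =>
      cases b with
      | true =>
        simp only [cnmInner, if_pos] at h
        obtain ⟨w, hw, rfl⟩ := Option.map_eq_some_iff.mp h
        simpa [cnmAvail] using ih bs w hw
      | false =>
        by_cases hm : sm1.1.length ≠ x.1.length ∨ sm1.2.length ≠ x.2.length
        · have hk : ¬ (cnmKey x = cnmKey sm1) := by
            intro h2
            rcases cnmKey_len h2 with ⟨e1, e2⟩
            rcases hm with h' | h' <;> [exact h' e1; exact h' e2]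
          simp only [cnmInner, Bool.false_eq_true, if_false, if_pos hm] at h
          obtain ⟨w, hw, rfl⟩ := Option.map_eq_some_iff.mp h
          simp [cnmAvail, hk, ih bs w hw]
        · by_cases hs : PySem.List.sorted sm1.1 (fun x => x) false = PySem.List.sorted x.1 (fun x => x) false ∧
              PySem.List.sorted sm1.2 (fun x => x) false = PySem.List.sorted x.2 (fun x => x) false
          · have hk : cnmKey x = cnmKey sm1 := by
              simp [cnmKey]; exact ⟨hs.1.symm, hs.2.symm⟩
            simp only [cnmInner, Bool.false_eq_true, if_false, if_neg hm, if_pos hs] at h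
            cases h
            simp [cnmAvail, hk]
          · have hk : ¬ (cnmKey x = cnmKey sm1) := by
              intro h2
              simp [cnmKey] at h2
              exact hs ⟨h2.1.symm, h2.2.symm⟩
            simp only [cnmInner, Bool.false_eq_true, if_false, if_neg hm, if_neg hs] at h
            obtain ⟨w, hw, rfl⟩ := Option.map_eq_some_iff.mp h
            simp [cnmAvail, hk, ih bs w hw]

-- the outer greedy loop succeeds iff the keys of m1 fit into the unvisited keys as a multiset
theorem cnmOuter_iff (m1 : List (List Int × List Int)) :
    ∀ (m2 : List (List Int × List Int)) (v : List Bool),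
    cnmOuter m1 m2 v = true ↔
      ((m1.map cnmKey : List (List (List Int))) : Multiset (List (List Int)))
        ≤ ((cnmAvail m2 v).map cnmKey : List (List (List Int))) := by
  induction m1 with
  | nil => intro m2 v; simp [cnmOuter]
  | cons sm1 rest ih =>
    intro m2 v
    cases h : cnmInner sm1 m2 v with
    | none =>
      have hnm := (cnmInner_none sm1 m2 v).mp h
      simp only [cnmOuter, h, List.map_cons]
      constructor
      · intro h'; cases h'
      · intro hle
        exfalso
        apply hnm
        have : cnmKey sm1 ∈ (((cnmAvail m2 v).map cnmKey : List (List (List Int))) : Multiset (List (List Int))) :=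
          Multiset.mem_of_le hle (by simp)
        simpa using this
    | some v' =>
      have hmem : cnmKey sm1 ∈ (cnmAvail m2 v).map cnmKey := by
        by_contra hn
        have hnone := (cnmInner_none sm1 m2 v).mpr hn
        rw [h] at hnone
        simp at hnone
      have hav := cnmInner_some sm1 m2 v v' h
      have hmap : (cnmAvail m2 v').map cnmKey = ((cnmAvail m2 v).map cnmKey).erase (cnmKey sm1) := by
        have hpred : ((fun x => x == cnmKey sm1) ∘ cnmKey)
            = (fun x : List Int × List Int => decide (cnmKey x = cnmKey sm1)) := by
          funext y; exact beq_eq_decide _ _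
        rw [hav, List.erase_eq_eraseP', List.eraseP_map, hpred]
      have hmem' : cnmKey sm1 ∈ (((cnmAvail m2 v).map cnmKey : List (List (List Int))) : Multiset (List (List Int))) := by
        simpa using hmem
      simp only [cnmOuter, h, List.map_cons]
      rw [ih m2 v', hmap]
      rw [show (((cnmKey sm1 :: rest.map cnmKey : List (List (List Int)))) : Multiset (List (List Int)))
            = cnmKey sm1 ::ₘ (rest.map cnmKey : List (List (List Int))) from rfl]
      rw [← Multiset.cons_erase hmem', Multiset.cons_le_cons_iff, Multiset.coe_erase]
      simp only [List.erase_eq_eraseP', beq_eq_decide]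



-- ===== VERDICT (by name: the statement is the Claim_ definition above) =====
theorem compare_num_mappings_spec : Claim_equal_compare_num_mappings := by
  intro m1 m2 _
  unfold Spec_compare_num_mappings compare_num_mappings compare_num_mappings_alt
  by_cases hlen : m1.length ≠ m2.length
  · simp [hlen]
  · have hl : m1.length = m2.length := not_not.mp hlen
    rw [if_neg hlen, if_neg hlen, Bool.eq_iff_iff, decide_eq_true_eq]
    rw [cnmOuter_iff, cnmAvail_replicate, PySem.List.sorted_id_eq_sorted_id_iff_perm]
    constructor
    · intro hle
      exact Multiset.coe_eq_coe.mp (Multiset.eq_of_le_of_card_le hle (by simp [hl]))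
    · intro hperm
      exact le_of_eq (Multiset.coe_eq_coe.mpr hperm)
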